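-- pv_equiv track=rewrite | github.com/dair-iitd/trine | ScheduleExtractor/extractor.py | normalize_sutime
-- ===== SOURCE A (Python) =====
-- def normalize_sutime(text):
-- 	if text.find("P1Y")!=-1: return "P1Y"
--
-- 	for i in range(1,50):
-- 		if text.find("P"+str(i)+"Y")!=-1: return "P"+str(i)+"Y"
-- 		if text.find("P"+str(i)+"D")!=-1: return "P"+str(i)+"D"
-- 		if text.find("P"+str(i)+"W")!=-1: return "P"+str(i)+"W"
--
-- 	if text.find("P1M")!=-1: return "P1M"
--
-- 	if text.find("P6M")!=-1: return "PY2"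
--
-- 	# keeping it last, position is important
-- 	if text.find("XXXX")!=-1: return "P1Y"
--
-- 	return None
-- ===== SOURCE B (Python) =====
-- # Build a priority table of (pattern, result) pairs once, collect the text's short
-- # substrings into a set in one pass, then return the result of the first pattern present.
--
-- _TABLE = (
--     [("P1Y", "P1Y")]
--     + [("P%d%s" % (i, u),) * 2 for i in range(1, 50) for u in ("Y", "D", "W")]
--     + [("P1M", "P1M"), ("P6M", "PY2"), ("XXXX", "P1Y")]
-- )
--
-- def normalize_sutime(text):
--     subs = {text[j:j + n] for j in range(len(text)) for n in (3, 4)}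
--     for pattern, result in _TABLE:
--         if pattern in subs:
--             return result
--     return None
-- ===== Notes on version B (the rewrite author's own statement) =====
-- stated objective: alternative
-- what changed: B precomputes the full priority table of (pattern,result) pairs and collects all length-3/4 substrings of the text into a set in one pass, then returns the result of the first table pattern present in that set, instead of A's 153 sequential full-text substring searches.
import Mathlib
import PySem

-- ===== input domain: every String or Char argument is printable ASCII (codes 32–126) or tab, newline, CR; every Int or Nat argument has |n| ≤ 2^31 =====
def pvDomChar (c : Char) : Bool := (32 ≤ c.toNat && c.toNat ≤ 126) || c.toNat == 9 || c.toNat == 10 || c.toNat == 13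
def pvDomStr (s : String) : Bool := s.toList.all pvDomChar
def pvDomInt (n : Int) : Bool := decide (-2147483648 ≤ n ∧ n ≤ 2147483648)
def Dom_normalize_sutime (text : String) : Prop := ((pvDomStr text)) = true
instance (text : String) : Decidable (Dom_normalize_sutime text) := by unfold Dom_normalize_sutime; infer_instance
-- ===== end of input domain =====

-- B builds the priority table once and intersects it with the set of the text's
-- short substrings collected in a single pass, instead of A's 153 sequential searches
-- (objective: alternative algorithm; same return value).

-- ===== PORT A =====
def nsA_loop (text : String) : List Int → Option String
  | [] => none
  | i :: rest =>
    if PySem.Str.find text ("P" ++ PySem.Int.toStr i ++ "Y") ≠ -1 then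
      some ("P" ++ PySem.Int.toStr i ++ "Y")
    else if PySem.Str.find text ("P" ++ PySem.Int.toStr i ++ "D") ≠ -1 then
      some ("P" ++ PySem.Int.toStr i ++ "D")
    else if PySem.Str.find text ("P" ++ PySem.Int.toStr i ++ "W") ≠ -1 then
      some ("P" ++ PySem.Int.toStr i ++ "W")
    else nsA_loop text rest

def normalize_sutime (text : String) : Option String :=
  if PySem.Str.find text "P1Y" ≠ -1 then some "P1Y"
  else
    match nsA_loop text (PySem.List.pyRange 1 50 1) with
    | some r => some r
    | none =>
      if PySem.Str.find text "P1M" ≠ -1 then some "P1M"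
      else if PySem.Str.find text "P6M" ≠ -1 then some "PY2"
      else if PySem.Str.find text "XXXX" ≠ -1 then some "P1Y"
      else none

-- ===== PORT B =====
-- ("P%d%s" % (i, u),) * 2 for u in ("Y", "D", "W")
def nsPats (i : Int) : List (String × String) :=
  ["Y", "D", "W"].map (fun u =>
    ("P" ++ PySem.Int.toStr i ++ u, "P" ++ PySem.Int.toStr i ++ u))

-- _TABLE
def nsTable : List (String × String) :=
  [("P1Y", "P1Y")]
  ++ (PySem.List.pyRange 1 50 1).flatMap nsPats
  ++ [("P1M", "P1M"), ("P6M", "PY2"), ("XXXX", "P1Y")]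

-- {text[j:j+n] for j in range(len(text)) for n in (3, 4)}; a string slice text[j:j+n]
-- with 0 ≤ j < len is exactly (toList.drop j).take n; set elements are the slices' char lists
def nsSubs (s : List Char) : PySem.Set (List Char) :=
  PySem.Set.ofList ((List.range s.length).flatMap
    (fun j => [(s.drop j).take 3, (s.drop j).take 4]))

-- for pattern, result in _TABLE: if pattern in subs: return result
def nsLookup (subs : PySem.Set (List Char)) : List (String × String) → Option String
  | [] => none
  | (pattern, result) :: rest =>
    if pattern.toList ∈ subs then some result else nsLookup subs rest

def normalize_sutime_alt (text : String) : Option String :=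
  nsLookup (nsSubs text.toList) nsTable

-- ===== PRECONDITION & SPEC =====
def Spec_normalize_sutime (text : String) (out : Option String) : Prop := out = normalize_sutime_alt text
instance (text : String) (out : Option String) : Decidable (Spec_normalize_sutime text out) := by unfold Spec_normalize_sutime; infer_instance

-- ===== CLAIM (what is proved, stated in full; the proofs are below) =====
def Claim_equal_normalize_sutime : Prop := ∀ (text : String), Dom_normalize_sutime text → Spec_normalize_sutime text (normalize_sutime text)

-- ===== LEMMAS AND PROOFS =====

lemma ns_find?_congr {α : Type} (p q : α → Bool) (l : List α) (h : ∀ x ∈ l, p x = q x) :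
    l.find? p = l.find? q := by
  induction l with
  | nil => rfl
  | cons x xs ih =>
    rw [List.find?_cons, List.find?_cons, h x (List.mem_cons_self), ih (fun y hy => h y (List.mem_cons_of_mem x hy))]

-- the common reference form: first table pattern that is an infix of the text
def nsRef (text : String) : Option String :=
  (nsTable.find? (fun p => decide (p.1.toList <:+: text.toList))).map (·.2)

lemma ns_mem_subs (s p : List Char) (h3 : 3 ≤ p.length) (h4 : p.length ≤ 4) :
    p ∈ nsSubs s ↔ p <:+: s := by
  unfold nsSubs
  rw [PySem.Set.mem_ofList]
  simp only [List.mem_flatMap, List.mem_range, List.mem_cons]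
  constructor
  · rintro ⟨j, hj, hp | hp | hp⟩
    · subst hp
      exact (List.take_prefix _ _).isInfix.trans (List.drop_suffix j s).isInfix
    · subst hp
      exact (List.take_prefix _ _).isInfix.trans (List.drop_suffix j s).isInfix
    · exact absurd hp (List.not_mem_nil)
  · intro hinf
    obtain ⟨t, u, h⟩ := hinf
    have hlen : t.length < s.length := by
      have := congrArg List.length h
      simp [List.length_append] at this
      omega
    have hdrop : s.drop t.length = p ++ u := by
      rw [← h, List.append_assoc, List.drop_left]
    refine ⟨t.length, hlen, ?_⟩
    have h34 : p.length = 3 ∨ p.length = 4 := by omega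
    rcases h34 with h' | h'
    · exact Or.inl (by rw [hdrop, ← h', List.take_left])
    · exact Or.inr (Or.inl (by rw [hdrop, ← h', List.take_left]))

set_option maxRecDepth 8192 in
lemma nsTable_len : ∀ p ∈ nsTable, 3 ≤ p.1.toList.length ∧ p.1.toList.length ≤ 4 := by
  decide

lemma nsA_loop_eq (text : String) (l : List Int) :
    nsA_loop text l
      = ((l.flatMap nsPats).find? (fun p => decide (p.1.toList <:+: text.toList))).map (·.2) := by
  induction l with
  | nil => simp [nsA_loop]
  | cons i rest ih =>
    rw [List.flatMap_cons, List.find?_append]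
    simp only [nsPats, List.map_cons, List.map_nil, List.find?_cons]
    by_cases hY : ('P' :: (PySem.Int.toChars i ++ ['Y'])) <:+: text.toList <;>
      by_cases hD : ('P' :: (PySem.Int.toChars i ++ ['D'])) <:+: text.toList <;>
        by_cases hW : ('P' :: (PySem.Int.toChars i ++ ['W'])) <:+: text.toList <;>
          simp [nsA_loop, ih, ne_eq, PySem.Chars.find_eq_neg_one_iff, hY, hD, hW, Option.or]

lemma nsA_eq (text : String) : normalize_sutime text = nsRef text := by
  unfold normalize_sutime nsRef nsTable
  rw [nsA_loop_eq]
  simp only [List.find?_append, List.find?_cons, List.find?_nil]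
  by_cases h1 : ['P','1','Y'] <:+: text.toList <;>
    rcases hF : (((PySem.List.pyRange 1 50 1).flatMap nsPats).find?
        (fun p => decide (p.1.toList <:+: text.toList))) with _ | p <;>
      by_cases hM : ['P','1','M'] <:+: text.toList <;>
        by_cases h6 : ['P','6','M'] <:+: text.toList <;>
          by_cases hX : ['X','X','X','X'] <:+: text.toList <;>
            simp [ne_eq, PySem.Chars.find_eq_neg_one_iff, h1, hM, h6, hX, hF, Option.or]

lemma nsLookup_eq (subs : PySem.Set (List Char)) (l : List (String × String)) :
    nsLookup subs l = (l.find? (fun p => decide (p.1.toList ∈ subs))).map (·.2) := by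
  induction l with
  | nil => rfl
  | cons p rest ih =>
    obtain ⟨pat, res⟩ := p
    rw [List.find?_cons]
    by_cases h : pat.toList ∈ subs <;> simp [nsLookup, h, ih]

lemma nsB_eq (text : String) : normalize_sutime_alt text = nsRef text := by
  unfold normalize_sutime_alt nsRef
  rw [nsLookup_eq]
  congr 1
  apply ns_find?_congr
  intro p hp
  have h := nsTable_len p hp
  simp [ns_mem_subs text.toList p.1.toList h.1 h.2]

-- ===== VERDICT (by name: the statement is the Claim_ definition above) =====
theorem normalize_sutime_spec : Claim_equal_normalize_sutime := by
  intro text _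
  unfold Spec_normalize_sutime
  rw [nsA_eq, nsB_eq]
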